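-- pv_equiv track=rewrite | github.com/xiaohai-huang/cab420-workspace | work/search-engine-technology/week6/wk6_index_solutions.py | term_at_a_time
-- ===== SOURCE A (Python) =====
-- def term_at_a_time(I, Q):  # index I is a Dirctionary of term:Directionary of (itemId:freq)
--     L={}    # L is the selected inverted list
--     R={}    # R is a directionary of docId:relevance
--     for list in I.items():
--         for id in list[1].items(): # get all document IDs with value 0
--             R[id[0]]=0
--         if (list[0] in Q):     # select inverted lists based on the query
--                 L[list[0]]= I[list[0]]
--     for (term, li) in L.items():  # traversal of the selected inverted list
--         for (d, f) in li.items(): # for each occurence of doc, update R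
--                 R[d] = R[d]  + f*Q[term]
--     return R
-- ===== SOURCE B (Python) =====
-- def term_at_a_time(I, Q):
--     # Document-at-a-time scoring: collect doc ids in first-occurrence order,
--     # then compute each doc's score by scanning the selected query terms.
--     docs, seen = [], set()
--     for li in I.values():
--         for d in li:
--             if d not in seen:
--                 seen.add(d)
--                 docs.append(d)
--     sel = [(t, li) for t, li in I.items() if t in Q]
--     return {d: sum(li[d] * Q[t] for t, li in sel if d in li) for d in docs}
-- ===== Notes on version B (the rewrite author's own statement) =====
-- stated objective: alternative
-- what changed: Replaced A's term-at-a-time accumulation (build R of zeros and a selected-list dict L, then add f*Q[term] into R posting by posting) with document-at-a-time scoring: collect the doc ids once in first-occurrence order, filter the query terms once, and compute each document's score as a single per-document sum over the selected terms.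
import Mathlib
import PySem

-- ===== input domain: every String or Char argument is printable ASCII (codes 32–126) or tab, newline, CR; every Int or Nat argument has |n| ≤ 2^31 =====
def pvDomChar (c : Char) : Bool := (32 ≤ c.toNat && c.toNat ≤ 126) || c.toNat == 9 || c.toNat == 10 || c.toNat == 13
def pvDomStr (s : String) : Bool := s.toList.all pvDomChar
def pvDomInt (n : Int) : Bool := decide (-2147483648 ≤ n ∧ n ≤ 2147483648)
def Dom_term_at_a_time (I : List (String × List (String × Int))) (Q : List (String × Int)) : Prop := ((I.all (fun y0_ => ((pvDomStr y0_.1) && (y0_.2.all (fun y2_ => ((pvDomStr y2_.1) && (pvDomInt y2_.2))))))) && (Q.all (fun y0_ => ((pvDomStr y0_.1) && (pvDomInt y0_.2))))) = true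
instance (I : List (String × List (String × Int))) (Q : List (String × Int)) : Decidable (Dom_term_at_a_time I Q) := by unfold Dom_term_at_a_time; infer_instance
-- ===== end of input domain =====

-- B replaces A's term-at-a-time accumulation by document-at-a-time scoring (per-doc sum over the
-- selected terms); objective: alternative decomposition, same exact result.

-- ===== PORT A =====
-- literal transliteration of A: first loop builds R (all doc ids ↦ 0) and L (selected lists),
-- second loop adds f*Q[term] into R for every posting of every selected list.
def term_at_a_time (I : List (String × List (String × Int))) (Q : List (String × Int)) : List (String × Int) :=
  let ID : PySem.Dict String (List (String × Int)) := PySem.Dict.mk I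
  let QD : PySem.Dict String Int := PySem.Dict.mk Q
  let LR :=
    I.foldl
      (fun (st : PySem.Dict String (List (String × Int)) × PySem.Dict String Int) lst =>
        let R := lst.2.foldl (fun R idp => R.insert idp.1 (0 : Int)) st.2
        let L := if QD.contains lst.1 then st.1.insert lst.1 (ID.getD lst.1 []) else st.1
        (L, R))
      (PySem.Dict.empty, PySem.Dict.empty)
  let R2 :=
    LR.1.items.foldl
      (fun R tl =>
        tl.2.foldl (fun R df => R.insert df.1 (R.getD df.1 0 + df.2 * QD.getD tl.1 0)) R)
      LR.2
  R2.items

-- ===== PORT B =====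
-- literal transliteration of B (Source B): docs = doc ids in first-occurrence order (seen : set),
-- sel = the (term, postings-dict) pairs whose term is in Q, then one comprehension per doc.
def term_at_a_time_alt (I : List (String × List (String × Int))) (Q : List (String × Int)) : List (String × Int) :=
  let QD : PySem.Dict String Int := PySem.Dict.mk Q
  let ds :=
    I.foldl
      (fun (st : List String × PySem.Set String) lst =>
        lst.2.foldl
          (fun (st : List String × PySem.Set String) dp =>
            if PySem.Set.contains st.2 dp.1 then st
            else (st.1 ++ [dp.1], PySem.Set.add st.2 dp.1))
          st)
      ([], PySem.Set.empty)
  let sel := (I.filter (fun p => QD.contains p.1)).map (fun p => (p.1, PySem.Dict.mk p.2))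
  ds.1.map (fun d =>
    (d, ((sel.filter (fun p => p.2.contains d)).map
          (fun p => p.2.getD d 0 * QD.getD p.1 0)).sum))

-- ===== PRECONDITION & SPEC =====
-- Pre_ only pins the Lean encoding of Python dicts: each association list has pairwise-distinct
-- keys, which is true of every Python input (dicts cannot carry duplicate keys), so no input on
-- which the Python A returns is excluded.
def Pre_term_at_a_time (I : List (String × List (String × Int))) (Q : List (String × Int)) : Prop :=
  (I.map Prod.fst).Nodup ∧ (Q.map Prod.fst).Nodup ∧ ∀ p ∈ I, (p.2.map Prod.fst).Nodup
instance (I : List (String × List (String × Int))) (Q : List (String × Int)) : Decidable (Pre_term_at_a_time I Q) := by unfold Pre_term_at_a_time; infer_instance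

def pvWitness_term_at_a_time : (List (String × List (String × Int))) × (List (String × Int)) :=
  ([("a", [("x", 2), ("y", 1)]), ("b", [("x", 3)])], [("a", 5)])

def Spec_term_at_a_time (I : List (String × List (String × Int))) (Q : List (String × Int)) (out : List (String × Int)) : Prop := out = term_at_a_time_alt I Q
instance (I : List (String × List (String × Int))) (Q : List (String × Int)) (out : List (String × Int)) : Decidable (Spec_term_at_a_time I Q out) := by unfold Spec_term_at_a_time; infer_instance

-- ===== CLAIM (what is proved, stated in full; the proofs are below) =====
def Claim_equal_term_at_a_time : Prop := ∀ (I : List (String × List (String × Int))) (Q : List (String × Int)), Dom_term_at_a_time I Q → Pre_term_at_a_time I Q → Spec_term_at_a_time I Q (term_at_a_time I Q)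

-- ===== LEMMAS AND PROOFS =====
-- weight lookup (Q[t])
def pvW (Q : List (String × Int)) (t : String) : Int := (PySem.Dict.mk Q).getD t 0

-- the two phase-1 folds of A, named for the proofs
def pvL (I : List (String × List (String × Int))) (Q : List (String × Int)) :
    PySem.Dict String (List (String × Int)) :=
  I.foldl (fun L lst => if (PySem.Dict.mk Q).contains lst.1 then
      L.insert lst.1 ((PySem.Dict.mk I).getD lst.1 []) else L) PySem.Dict.empty

def pvR0 (I : List (String × List (String × Int))) : PySem.Dict String Int :=
  I.foldl (fun R lst => lst.2.foldl (fun R idp => R.insert idp.1 (0 : Int)) R) PySem.Dict.empty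

-- split A's phase-1 product fold into its two components
theorem pvA_eq (I : List (String × List (String × Int))) (Q : List (String × Int)) :
    term_at_a_time I Q =
      ((pvL I Q).items.foldl
        (fun R tl => tl.2.foldl
          (fun R df => R.insert df.1 (R.getD df.1 0 + df.2 * pvW Q tl.1)) R)
        (pvR0 I)).items := by
  unfold term_at_a_time pvL pvR0 pvW
  simp only [PySem.List.foldl_prod_mk
    (f := fun (L : PySem.Dict String (List (String × Int))) lst =>
      if (PySem.Dict.mk Q).contains lst.1 then
        L.insert lst.1 ((PySem.Dict.mk I).getD lst.1 []) else L)
    (g := fun (R : PySem.Dict String Int) (lst : String × List (String × Int)) =>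
      lst.2.foldl (fun R idp => R.insert idp.1 (0 : Int)) R)]

-- ---- phase 1, L component: the selected lists, in index order ----
theorem pvL_items (I : List (String × List (String × Int))) (Q : List (String × Int))
    (hI : (I.map Prod.fst).Nodup) :
    (pvL I Q).items =
      (I.filter (fun p => (PySem.Dict.mk Q).contains p.1)).map
        (fun p => (p.1, (PySem.Dict.mk I).getD p.1 [])) := by
  unfold pvL
  rw [← List.foldl_filter]
  have hnd : ((I.filter (fun p => (PySem.Dict.mk Q).contains p.1)).map Prod.fst).Nodup :=
    ((List.filter_sublist (l := I)).map Prod.fst).nodup hI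
  rw [PySem.Dict.items_foldl_insert_fresh _ Prod.fst
        (fun p => (PySem.Dict.mk I).getD p.1 []) PySem.Dict.empty (by simp) hnd]
  simp [PySem.Dict.empty]

-- for p ∈ I with distinct keys, looking p.1 up in dict(I) gives p.2
theorem pvLookup (I : List (String × List (String × Int))) (p : String × List (String × Int))
    (hp : p ∈ I) (hI : (I.map Prod.fst).Nodup) :
    (PySem.Dict.mk I).getD p.1 [] = p.2 :=
  PySem.Dict.getD_of_mem_items _ (by simpa using hp) (by simpa using hI) []

-- ---- phase 1, R component: every stored value is 0 ----
theorem pvInner_getD_zero (li : List (String × Int)) (R : PySem.Dict String Int)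
    (h : ∀ d, R.getD d 0 = 0) (d : String) :
    (li.foldl (fun R idp => R.insert idp.1 (0 : Int)) R).getD d 0 = 0 := by
  induction li generalizing R with
  | nil => exact h d
  | cons a tl ih =>
      exact ih _ (fun e => by rw [PySem.Dict.getD_insert]; split <;> [rfl; exact h e])

theorem pvR0_getD_zero (I : List (String × List (String × Int))) (d : String) :
    (pvR0 I).getD d 0 = 0 := by
  unfold pvR0
  suffices h : ∀ (l : List (String × List (String × Int))) (R : PySem.Dict String Int),
      (∀ e, R.getD e 0 = 0) → ∀ e,
      (l.foldl (fun R lst => lst.2.foldl (fun R idp => R.insert idp.1 (0:Int)) R) R).getD e 0 = 0 by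
    exact h I _ (fun e => PySem.Dict.getD_empty ..) d
  intro l
  induction l with
  | nil => exact fun R h e => h e
  | cons a tl ih => exact fun R h e => ih _ (fun e => pvInner_getD_zero _ _ h e) e

-- ---- phase 1, R component: keys = doc ids in first-occurrence order ----
theorem pvR0_keys (I : List (String × List (String × Int))) :
    (pvR0 I).keys =
      I.foldl (fun s lst => PySem.Set.update s (lst.2.map Prod.fst)) ([] : List String) := by
  unfold pvR0
  suffices h : ∀ (l : List (String × List (String × Int))) (R : PySem.Dict String Int),
      (l.foldl (fun R lst => lst.2.foldl (fun R idp => R.insert idp.1 (0:Int)) R) R).keys =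
      l.foldl (fun s lst => PySem.Set.update s (lst.2.map Prod.fst)) R.keys by
    simpa [PySem.Dict.empty, PySem.Dict.keys] using h I PySem.Dict.empty
  intro l
  induction l with
  | nil => intro R; rfl
  | cons a tl ih =>
      intro R
      rw [List.foldl_cons, List.foldl_cons, ih,
        PySem.Dict.keys_foldl_insert_key (key := Prod.fst) (f := fun _ _ => (0:Int))]

theorem pvR0_keys_nodup (I : List (String × List (String × Int))) : (pvR0 I).keys.Nodup := by
  unfold pvR0
  suffices h : ∀ (l : List (String × List (String × Int))) (R : PySem.Dict String Int),
      R.keys.Nodup →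
      (l.foldl (fun R lst => lst.2.foldl (fun R idp => R.insert idp.1 (0:Int)) R) R).keys.Nodup by
    exact h I _ (PySem.Dict.nodup_keys_empty ..)
  intro l
  induction l with
  | nil => exact fun R h => h
  | cons a tl ih =>
      exact fun R h => ih _ (PySem.Dict.nodup_keys_foldl_insert_key a.2 Prod.fst (fun _ _ => (0:Int)) R h)

-- every doc id occurring in a posting list of I is a key of pvR0
theorem pvR0_mem_keys (I : List (String × List (String × Int)))
    (lst : String × List (String × Int)) (hl : lst ∈ I) (d : String)
    (hd : d ∈ lst.2.map Prod.fst) : d ∈ (pvR0 I).keys := by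
  rw [pvR0_keys]
  suffices h : ∀ (l : List (String × List (String × Int))) (s : List String),
      (lst ∈ l ∨ d ∈ s) →
      d ∈ l.foldl (fun s lst => PySem.Set.update s (lst.2.map Prod.fst)) s by
    exact h I [] (Or.inl hl)
  intro l
  induction l with
  | nil =>
      intro s h
      rcases h with h | h
      · exact absurd h (by simp)
      · exact h
  | cons a tl ih =>
      intro s h
      rw [List.foldl_cons]
      rcases h with h | h
      · rcases List.mem_cons.mp h with h | h
        · subst h; exact ih _ (Or.inr (by rw [PySem.Set.mem_update]; exact Or.inr hd))
        · exact ih _ (Or.inl h)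
      · exact ih _ (Or.inr (by rw [PySem.Set.mem_update]; exact Or.inl h))

-- ---- B's first pass: docs = the keys of pvR0 ----
theorem pvAlt_ds (I : List (String × List (String × Int))) :
    (I.foldl
      (fun (st : List String × PySem.Set String) lst =>
        lst.2.foldl
          (fun (st : List String × PySem.Set String) dp =>
            if PySem.Set.contains st.2 dp.1 then st
            else (st.1 ++ [dp.1], PySem.Set.add st.2 dp.1))
          st)
      ([], PySem.Set.empty)).1 = (pvR0 I).keys := by
  have inner : ∀ (li : List (String × Int)) (s : PySem.Set String),
      li.foldl
        (fun (st : List String × PySem.Set String) dp =>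
          if PySem.Set.contains st.2 dp.1 then st
          else (st.1 ++ [dp.1], PySem.Set.add st.2 dp.1)) (s, s) =
      (li.foldl (fun s dp => PySem.Set.add s dp.1) s,
       li.foldl (fun s dp => PySem.Set.add s dp.1) s) := by
    intro li
    induction li with
    | nil => intro s; rfl
    | cons a tl ih =>
        intro s
        by_cases h : a.1 ∈ s
        · have hc : PySem.Set.contains s a.1 = true := by simp [pysem]; exact h
          simp only [List.foldl_cons, hc, PySem.Set.add_of_mem h]
          exact ih s
        · have hc : PySem.Set.contains s a.1 = false := by
            rw [← Bool.not_eq_true, PySem.Set.contains_iff]; exact h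
          simp only [List.foldl_cons, hc, Bool.false_eq_true, if_false,
            PySem.Set.add_of_not_mem h]
          exact ih _
  have outer : ∀ (l : List (String × List (String × Int))) (s : PySem.Set String),
      l.foldl
        (fun (st : List String × PySem.Set String) lst =>
          lst.2.foldl
            (fun (st : List String × PySem.Set String) dp =>
              if PySem.Set.contains st.2 dp.1 then st
              else (st.1 ++ [dp.1], PySem.Set.add st.2 dp.1)) st) (s, s) =
      (l.foldl (fun s lst => lst.2.foldl (fun s dp => PySem.Set.add s dp.1) s) s,
       l.foldl (fun s lst => lst.2.foldl (fun s dp => PySem.Set.add s dp.1) s) s) := by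
    intro l
    induction l with
    | nil => intro s; rfl
    | cons a tl ih =>
        intro s
        simp only [List.foldl_cons, inner a.2 s]
        exact ih _
  rw [pvR0_keys]
  rw [show (([], PySem.Set.empty) : List String × PySem.Set String)
        = ((PySem.Set.empty : PySem.Set String), (PySem.Set.empty : PySem.Set String)) from rfl,
    outer I PySem.Set.empty]
  simp only [← PySem.Set.update_map_eq_foldl_add]
  rfl

-- ---- phase 2: flatten the nested update loop into one stream of (doc, increment) updates ----
def pvUpd (R : PySem.Dict String Int) (u : String × Int) : PySem.Dict String Int :=
  R.insert u.1 (R.getD u.1 0 + u.2)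

def pvU (Ls : List (String × List (String × Int))) (Q : List (String × Int)) :
    List (String × Int) :=
  Ls.flatMap (fun tl => tl.2.map (fun df => (df.1, df.2 * pvW Q tl.1)))

theorem pvPhase2_flat (Q : List (String × Int)) :
    ∀ (Ls : List (String × List (String × Int))) (R : PySem.Dict String Int),
    Ls.foldl
      (fun R tl => tl.2.foldl
        (fun R df => R.insert df.1 (R.getD df.1 0 + df.2 * pvW Q tl.1)) R) R =
    (pvU Ls Q).foldl pvUpd R := by
  intro Ls
  induction Ls with
  | nil => intro R; rfl
  | cons a tl ih =>
      intro R
      rw [List.foldl_cons, pvU, List.flatMap_cons, List.foldl_append, ← pvU, ih,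
        List.foldl_map]
      rfl

-- inserting at an existing key bumps that entry in place
theorem pvItems_insert_add (R : PySem.Dict String Int) (hnd : R.keys.Nodup) (d : String)
    (hc : R.contains d = true) (c : Int) :
    (R.insert d (R.getD d 0 + c)).items =
      R.items.map (fun p => if p.1 = d then (p.1, p.2 + c) else p) := by
  rw [PySem.Dict.items_insert_of_contains _ _ hc]
  apply List.map_congr_left
  intro p hp
  by_cases h : p.1 = d
  · have : R.getD d 0 = p.2 := by
      rw [← h]
      exact PySem.Dict.getD_of_mem_items _ (by simpa using hp) hnd 0
    simp [h, this]
  · simp [h]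

-- the increment stream's total contribution to doc d
def pvS (U : List (String × Int)) (d : String) : Int :=
  ((U.filter (fun u => u.1 == d)).map Prod.snd).sum

theorem pvFoldl_upd_items :
    ∀ (U : List (String × Int)) (R : PySem.Dict String Int), R.keys.Nodup →
    (∀ u ∈ U, R.contains u.1 = true) →
    ((U.foldl pvUpd R).items) = R.items.map (fun p => (p.1, p.2 + pvS U p.1)) := by
  intro U
  induction U with
  | nil => intro R _ _; simp [pvS]
  | cons u U' ih =>
      intro R hnd hc
      have hcu : R.contains u.1 = true := hc u List.mem_cons_self
      have hR' : (pvUpd R u).items = R.items.map (fun p => if p.1 = u.1 then (p.1, p.2 + u.2) else p) :=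
        pvItems_insert_add R hnd u.1 hcu u.2
      have hkeys : (pvUpd R u).keys = R.keys := by
        exact PySem.Dict.keys_insert_of_contains _ _ hcu
      rw [List.foldl_cons, ih (pvUpd R u) (hkeys ▸ hnd)
        (fun v hv => by
          unfold pvUpd
          rw [PySem.Dict.contains_insert]
          simp [hc v (List.mem_cons_of_mem _ hv)]),
        hR', List.map_map]
      apply List.map_congr_left
      intro p _
      by_cases h : p.1 = u.1
      · have hb : (u.1 == p.1) = true := by simp [h]
        simp only [Function.comp_apply, if_pos h, pvS, List.filter_cons, hb]
        simp [h]
        ring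
      · have hb : (u.1 == p.1) = false := by simp [Ne.symm h]
        simp only [Function.comp_apply, if_neg h, pvS, List.filter_cons, hb]
        simp

-- ---- sums ----
theorem pvSum_map_filter {α : Type} (l : List α) (q : α → Bool) (f : α → Int) :
    ((l.filter q).map f).sum = (l.map (fun a => if q a then f a else 0)).sum := by
  induction l with
  | nil => rfl
  | cons a tl ih =>
      by_cases h : q a
      · simp [h, ih]
      · simp [h, ih]

theorem pvS_flat (Q : List (String × Int)) (d : String) :
    ∀ (Ls : List (String × List (String × Int))),
    pvS (pvU Ls Q) d =
      (Ls.map (fun tl => pvS (tl.2.map (fun df => (df.1, df.2 * pvW Q tl.1))) d)).sum := by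
  intro Ls
  induction Ls with
  | nil => rfl
  | cons a tl ih =>
      rw [pvU, List.flatMap_cons, ← pvU, List.map_cons, List.sum_cons, ← ih, pvS,
        List.filter_append, List.map_append, List.sum_append]
      rfl

-- a Nodup posting list contributes (f(d) * c) iff it contains d
theorem pvS_li (li : List (String × Int)) (h : (li.map Prod.fst).Nodup) (c : Int) (d : String) :
    pvS (li.map (fun df => (df.1, df.2 * c))) d =
      if (PySem.Dict.mk li).contains d then (PySem.Dict.mk li).getD d 0 * c else 0 := by
  have hnone : ∀ (l : List (String × Int)), d ∉ l.map Prod.fst →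
      pvS (l.map (fun df => (df.1, df.2 * c))) d = 0 := by
    intro l hl
    unfold pvS
    rw [List.filter_eq_nil_iff.mpr ?_]
    · rfl
    · intro u hu
      obtain ⟨df, hdf, rfl⟩ := List.mem_map.mp hu
      simp only [beq_iff_eq]
      intro hud
      exact hl (List.mem_map.mpr ⟨df, hdf, hud⟩)
  induction li with
  | nil => simp [pvS, PySem.Dict.contains]
  | cons a tl ih =>
      have h' : (a.1 :: tl.map Prod.fst).Nodup := by rw [← List.map_cons]; exact h
      by_cases hd : a.1 = d
      · have htl : d ∉ tl.map Prod.fst := by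
          rw [← hd]; exact (List.nodup_cons.mp h').1
        have hc : (PySem.Dict.mk (a :: tl)).contains d = true := by
          simp [PySem.Dict.contains, hd]
        have hg : (PySem.Dict.mk (a :: tl)).getD d 0 = a.2 := by
          rw [PySem.Dict.getD_eq_get?_getD, PySem.Dict.get?_mk_cons]
          simp [hd]
        have hbeq : (a.1 == d) = true := by simp [hd]
        have h0 := hnone tl htl
        rw [hc, if_pos rfl, hg]
        unfold pvS at h0 ⊢
        rw [List.map_cons, List.filter_cons]
        simp [hbeq, h0]
      · have hc : (PySem.Dict.mk (a :: tl)).contains d = (PySem.Dict.mk tl).contains d := by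
          simp [PySem.Dict.contains, hd]
        have hg : (PySem.Dict.mk (a :: tl)).getD d 0 = (PySem.Dict.mk tl).getD d 0 := by
          rw [PySem.Dict.getD_eq_get?_getD, PySem.Dict.get?_mk_cons, PySem.Dict.getD_eq_get?_getD]
          simp [hd]
        have hbeq : (a.1 == d) = false := by simp [hd]
        rw [hc, hg, ← ih (List.nodup_cons.mp h').2]
        unfold pvS
        rw [List.map_cons, List.filter_cons]
        simp only [hbeq, Bool.false_eq_true, if_false]

-- ===== VERDICT (by name: the statement is the Claim_ definition above) =====
theorem term_at_a_time_spec : Claim_equal_term_at_a_time := by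
  intro I Q _ hPre
  obtain ⟨hI, hQ, hli⟩ := hPre
  unfold Spec_term_at_a_time
  have hFsub : ∀ p ∈ I.filter (fun p => (PySem.Dict.mk Q).contains p.1), p ∈ I :=
    fun p hp => (List.mem_filter.mp hp).1
  -- A's selected lists are exactly the filtered index entries
  have hLitems : (pvL I Q).items = I.filter (fun p => (PySem.Dict.mk Q).contains p.1) := by
    rw [pvL_items I Q hI]
    have h1 : ∀ p ∈ I.filter (fun p => (PySem.Dict.mk Q).contains p.1),
        (p.1, (PySem.Dict.mk I).getD p.1 []) = id p := fun p hp => by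
      rw [pvLookup I p (hFsub p hp) hI]; rfl
    rw [List.map_congr_left h1, List.map_id]
  -- every update in the flattened stream hits an existing key of pvR0
  have hcont : ∀ u ∈ pvU (I.filter (fun p => (PySem.Dict.mk Q).contains p.1)) Q,
      (pvR0 I).contains u.1 = true := by
    intro u hu
    unfold pvU at hu
    obtain ⟨tl, htl, hdf⟩ := List.mem_flatMap.mp hu
    obtain ⟨df, hdf2, rfl⟩ := List.mem_map.mp hdf
    exact (PySem.Dict.contains_iff_mem_keys _ _).mpr
      (pvR0_mem_keys I tl (hFsub tl htl) df.1 (List.mem_map.mpr ⟨df, hdf2, rfl⟩))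
  have hR0items : (pvR0 I).items = (pvR0 I).keys.map (fun k => (k, (0:Int))) := by
    rw [PySem.Dict.items_eq_map_keys (pvR0 I) (pvR0_keys_nodup I) 0]
    exact List.map_congr_left (fun k _ => by rw [pvR0_getD_zero])
  rw [pvA_eq, hLitems, pvPhase2_flat Q _ (pvR0 I),
    pvFoldl_upd_items _ (pvR0 I) (pvR0_keys_nodup I) hcont, hR0items, List.map_map]
  -- now the B side
  unfold term_at_a_time_alt
  simp only [pvAlt_ds I]
  apply List.map_congr_left
  intro d _
  simp only [Function.comp_apply]
  refine Prod.ext rfl ?_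
  show (0:Int) + pvS (pvU (I.filter (fun p => (PySem.Dict.mk Q).contains p.1)) Q) d = _
  rw [List.filter_map, List.map_map,
    pvSum_map_filter (I.filter (fun p => (PySem.Dict.mk Q).contains p.1))
      ((fun (p : String × PySem.Dict String Int) => p.2.contains d) ∘
        (fun p => (p.1, PySem.Dict.mk p.2)))
      ((fun (p : String × PySem.Dict String Int) => p.2.getD d 0 * (PySem.Dict.mk Q).getD p.1 0) ∘
        (fun p => (p.1, PySem.Dict.mk p.2))),
    zero_add (pvS (pvU (I.filter (fun p => (PySem.Dict.mk Q).contains p.1)) Q) d), pvS_flat Q d]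
  refine congrArg List.sum (List.map_congr_left ?_)
  intro tl htl
  simp only [Function.comp_apply]
  rw [pvS_li tl.2 (hli tl (hFsub tl htl)) (pvW Q tl.1) d]
  rfl
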